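-- pv_equiv track=rewrite | github.com/AlexandreDubray/pwmc_benchmarks | instances/bayesian_networks/bif_to_pl.py | remove_numbers
-- ===== SOURCE A (Python) =====
-- def remove_numbers(s):
--     new_s = s
--     for (old, new) in zip([str(x) for x in range(10)], ['a', 'b', 'c', 'd', 'e', 'f', 'g', 'h', 'i', 'j']):
--         new_s = new_s.replace(old, new)
--     new_s = new_s.replace('<', 'lt')
--     new_s = new_s.replace('>', 'gt')
--     new_s = new_s.replace('<=', 'lte')
--     new_s = new_s.replace('>=', 'gte')
--     new_s = new_s.replace('+', 'plus')
--     new_s = new_s.replace('-', 'minus')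
--     new_s = new_s.replace('*', 'times')
--     new_s = new_s.replace('/', 'div')
--     new_s = new_s.lower()
--     return new_s
-- ===== SOURCE B (Python) =====
-- _TABLE = {
--     '0': 'a', '1': 'b', '2': 'c', '3': 'd', '4': 'e',
--     '5': 'f', '6': 'g', '7': 'h', '8': 'i', '9': 'j',
--     '<': 'lt', '>': 'gt', '+': 'plus', '-': 'minus',
--     '*': 'times', '/': 'div',
-- }
--
-- def remove_numbers(s):
--     return ''.join(_TABLE.get(c, c) for c in s).lower()
-- ===== Notes on version B (the rewrite author's own statement) =====
-- stated objective: simpler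
-- what changed: Replaced ~13 sequential full-string replace passes by a single char-keyed dict built once and one table-driven pass over the characters (join, then one lower); in CPython the C-level replace passes are still faster, so no speed is claimed.
import Mathlib
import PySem

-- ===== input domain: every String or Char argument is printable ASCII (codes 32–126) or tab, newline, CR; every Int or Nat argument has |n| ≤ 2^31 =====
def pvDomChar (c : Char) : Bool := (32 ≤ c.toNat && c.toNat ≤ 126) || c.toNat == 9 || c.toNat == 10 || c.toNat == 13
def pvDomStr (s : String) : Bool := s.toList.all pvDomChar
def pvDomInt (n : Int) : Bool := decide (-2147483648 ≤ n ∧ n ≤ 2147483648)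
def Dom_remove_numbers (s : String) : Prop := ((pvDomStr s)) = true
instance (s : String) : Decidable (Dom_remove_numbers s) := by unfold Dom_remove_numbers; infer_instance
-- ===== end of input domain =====

-- B replaces A's ~13 sequential full-string .replace passes by ONE table-driven pass
-- over the characters (dict lookup per char, join, lower): same exact output, simpler control flow.

-- ===== PORT A =====
def remove_numbers (s : String) : String :=
  let pairs := List.zip ((PySem.List.pyRange 0 10 1).map (fun x => PySem.Int.toStr x))
      ["a", "b", "c", "d", "e", "f", "g", "h", "i", "j"]
  let n0 := pairs.foldl (fun acc p => PySem.Str.replace acc p.1 p.2) s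
  let n1 := PySem.Str.replace n0 "<" "lt"
  let n2 := PySem.Str.replace n1 ">" "gt"
  let n3 := PySem.Str.replace n2 "<=" "lte"
  let n4 := PySem.Str.replace n3 ">=" "gte"
  let n5 := PySem.Str.replace n4 "+" "plus"
  let n6 := PySem.Str.replace n5 "-" "minus"
  let n7 := PySem.Str.replace n6 "*" "times"
  let n8 := PySem.Str.replace n7 "/" "div"
  PySem.Str.lower n8

-- ===== PORT B =====
def pvTable : PySem.Dict Char String := PySem.Dict.ofList
  [('0', "a"), ('1', "b"), ('2', "c"), ('3', "d"), ('4', "e"),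
   ('5', "f"), ('6', "g"), ('7', "h"), ('8', "i"), ('9', "j"),
   ('<', "lt"), ('>', "gt"), ('+', "plus"), ('-', "minus"),
   ('*', "times"), ('/', "div")]

def remove_numbers_alt (s : String) : String :=
  PySem.Str.lower (String.ofList (s.toList.flatMap (fun c => (pvTable.getD c (String.singleton c)).toList)))

-- ===== PRECONDITION & SPEC =====
def Spec_remove_numbers (s : String) (out : String) : Prop := out = remove_numbers_alt s
instance (s : String) (out : String) : Decidable (Spec_remove_numbers s out) := by unfold Spec_remove_numbers; infer_instance

-- ===== CLAIM (what is proved, stated in full; the proofs are below) =====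
def Claim_equal_remove_numbers : Prop := ∀ (s : String), Dom_remove_numbers s → Spec_remove_numbers s (remove_numbers s)

-- ===== LEMMAS AND PROOFS =====

-- per-character effect of replacing the single character o by rep
def fch (o : Char) (rep : List Char) (c : Char) : List Char := if c = o then rep else [c]

-- sequential composition of single-character replacements, as one per-character function
def chainC : List (Char × List Char) → Char → List Char
  | [], c => [c]
  | p :: ps, c => (fch p.1 p.2 c).flatMap (chainC ps)

def psA : List (Char × List Char) :=
  [('0', ['a']), ('1', ['b']), ('2', ['c']), ('3', ['d']), ('4', ['e']),
   ('5', ['f']), ('6', ['g']), ('7', ['h']), ('8', ['i']), ('9', ['j']),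
   ('<', ['l', 't']), ('>', ['g', 't'])]

def psB : List (Char × List Char) :=
  [('+', ['p', 'l', 'u', 's']), ('-', ['m', 'i', 'n', 'u', 's']),
   ('*', ['t', 'i', 'm', 'e', 's']), ('/', ['d', 'i', 'v'])]

theorem go_single (o : Char) (rep : List Char) :
    ∀ (l acc : List Char), PySem.Chars.replace.go [o] rep l.length l acc = acc.reverse ++ l.flatMap (fch o rep) := by
  intro l
  induction l with
  | nil => intro acc; simp [PySem.Chars.replace.go]
  | cons c t ih =>
    intro acc
    rw [List.length_cons, PySem.Chars.replace.go]
    by_cases h : c = o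
    · subst h; simp [List.isPrefixOf, ih, fch]
    · simp [List.isPrefixOf, Ne.symm h, ih, fch, h]

theorem replace_single (o : Char) (rep l : List Char) :
    PySem.Chars.replace l [o] rep = l.flatMap (fch o rep) := by
  have := go_single o rep l []
  simpa [PySem.Chars.replace] using this

theorem go_skip (o : Char) (rest rep : List Char) :
    ∀ (l acc : List Char), (∀ c ∈ l, c ≠ o) →
      PySem.Chars.replace.go (o :: rest) rep l.length l acc = acc.reverse ++ l := by
  intro l
  induction l with
  | nil => intro acc _; simp [PySem.Chars.replace.go]
  | cons c t ih =>
    intro acc h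
    rw [List.length_cons, PySem.Chars.replace.go]
    have hc : c ≠ o := h c (by simp)
    have ht := ih (c :: acc) (fun x hx => h x (by simp [hx]))
    simp only [List.isPrefixOf, Bool.and_eq_true, beq_iff_eq] at *
    simp [Ne.symm hc, ht]

theorem replace_skip (o : Char) (rest rep l : List Char) (h : ∀ c ∈ l, c ≠ o) :
    PySem.Chars.replace l (o :: rest) rep = l := by
  have := go_skip o rest rep l [] h
  simpa [PySem.Chars.replace] using this

theorem chainC_mem : ∀ (ps : List (Char × List Char)) (d c : Char), c ∈ chainC ps d →
    (c = d ∧ ∀ p ∈ ps, d ≠ p.1) ∨ ∃ p ∈ ps, c ∈ p.2 := by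
  intro ps
  induction ps with
  | nil =>
    intro d c hc
    simp only [chainC, List.mem_singleton] at hc
    exact Or.inl ⟨hc, by simp⟩
  | cons p ps ih =>
    intro d c hc
    simp only [chainC, List.mem_flatMap] at hc
    obtain ⟨e, he, hce⟩ := hc
    by_cases hd : d = p.1
    · have he' : e ∈ p.2 := by simpa [fch, hd] using he
      rcases ih e c hce with ⟨hceq, _⟩ | ⟨q, hq, hcq⟩
      · exact Or.inr ⟨p, by simp, hceq ▸ he'⟩
      · exact Or.inr ⟨q, by simp [hq], hcq⟩
    · have he' : e = d := by simpa [fch, hd] using he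
      subst he'
      rcases ih e c hce with ⟨hceq, hall⟩ | ⟨q, hq, hcq⟩
      · exact Or.inl ⟨hceq, by simpa [hd] using hall⟩
      · exact Or.inr ⟨q, by simp [hq], hcq⟩

theorem chainC_append : ∀ (ps qs : List (Char × List Char)) (d : Char),
    chainC (ps ++ qs) d = (chainC ps d).flatMap (chainC qs) := by
  intro ps
  induction ps with
  | nil => intro qs d; simp [chainC]
  | cons p ps ih =>
    intro qs d
    simp only [List.cons_append, chainC, List.flatMap_assoc]
    exact List.flatMap_congr (fun x _ => ih qs x)

-- no '<' and no '>' survives the first 12 replacements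
theorem chainA_no_angle (d c : Char) (hc : c ∈ chainC psA d) : c ≠ '<' ∧ c ≠ '>' := by
  rcases chainC_mem psA d c hc with ⟨rfl, hall⟩ | ⟨q, hq, hcq⟩
  · constructor
    · exact hall ('<', ['l', 't']) (by simp [psA])
    · exact hall ('>', ['g', 't']) (by simp [psA])
  · simp only [psA, List.mem_cons, List.not_mem_nil, or_false] at hq
    rcases hq with rfl | rfl | rfl | rfl | rfl | rfl | rfl | rfl | rfl | rfl | rfl | rfl <;>
      simp only [List.mem_cons, List.not_mem_nil, or_false] at hcq <;>
      rcases hcq with rfl | rfl <;> exact ⟨by decide, by decide⟩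

-- the first twelve sequential replaces, as one flatMap
theorem stage12 (l : List Char) :
    PySem.Chars.replace (PySem.Chars.replace (PySem.Chars.replace (PySem.Chars.replace
      (PySem.Chars.replace (PySem.Chars.replace (PySem.Chars.replace (PySem.Chars.replace
      (PySem.Chars.replace (PySem.Chars.replace (PySem.Chars.replace (PySem.Chars.replace
      l ['0'] ['a']) ['1'] ['b']) ['2'] ['c']) ['3'] ['d']) ['4'] ['e']) ['5'] ['f'])
      ['6'] ['g']) ['7'] ['h']) ['8'] ['i']) ['9'] ['j']) ['<'] ['l', 't']) ['>'] ['g', 't']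
      = l.flatMap (chainC psA) := by
  simp only [replace_single, List.flatMap_assoc, psA, chainC, List.flatMap_singleton']

-- pointwise agreement of A's composed per-character function with B's table lookup (after lowercasing)
theorem pointwise (d : Char) :
    List.map PySem.Chars.lowerChar (chainC (psA ++ psB) d)
      = List.map PySem.Chars.lowerChar (pvTable.getD d (String.singleton d)).toList := by
  by_cases h0 : d = '0'; · subst h0; decide
  by_cases h1 : d = '1'; · subst h1; decide
  by_cases h2 : d = '2'; · subst h2; decide
  by_cases h3 : d = '3'; · subst h3; decide
  by_cases h4 : d = '4'; · subst h4; decide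
  by_cases h5 : d = '5'; · subst h5; decide
  by_cases h6 : d = '6'; · subst h6; decide
  by_cases h7 : d = '7'; · subst h7; decide
  by_cases h8 : d = '8'; · subst h8; decide
  by_cases h9 : d = '9'; · subst h9; decide
  by_cases hlt : d = '<'; · subst hlt; decide
  by_cases hgt : d = '>'; · subst hgt; decide
  by_cases hpl : d = '+'; · subst hpl; decide
  by_cases hmi : d = '-'; · subst hmi; decide
  by_cases hti : d = '*'; · subst hti; decide
  by_cases hdi : d = '/'; · subst hdi; decide
  have hchain : chainC (psA ++ psB) d = [d] := by
    simp [psA, psB, chainC, fch, h0, h1, h2, h3, h4, h5, h6, h7, h8, h9,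
      hlt, hgt, hpl, hmi, hti, hdi]
  have hmk : pvTable = PySem.Dict.mk
      [('0', "a"), ('1', "b"), ('2', "c"), ('3', "d"), ('4', "e"),
       ('5', "f"), ('6', "g"), ('7', "h"), ('8', "i"), ('9', "j"),
       ('<', "lt"), ('>', "gt"), ('+', "plus"), ('-', "minus"),
       ('*', "times"), ('/', "div")] := rfl
  have htab : pvTable.getD d (String.singleton d) = String.singleton d := by
    simp [hmk, PySem.Dict.getD, beq_iff_eq,
      Ne.symm h0, Ne.symm h1, Ne.symm h2, Ne.symm h3, Ne.symm h4, Ne.symm h5,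
      Ne.symm h6, Ne.symm h7, Ne.symm h8, Ne.symm h9, Ne.symm hlt, Ne.symm hgt,
      Ne.symm hpl, Ne.symm hmi, Ne.symm hti, Ne.symm hdi, PySem.Dict.get?]
  simp [hchain, htab, String.toList_singleton]

theorem remove_numbers_eq (s : String) : remove_numbers s = remove_numbers_alt s := by
  apply String.toList_inj.mp
  have hpairs : List.zip ((PySem.List.pyRange 0 10 1).map (fun x => PySem.Int.toStr x))
      ["a", "b", "c", "d", "e", "f", "g", "h", "i", "j"]
      = [("0", "a"), ("1", "b"), ("2", "c"), ("3", "d"), ("4", "e"),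
         ("5", "f"), ("6", "g"), ("7", "h"), ("8", "i"), ("9", "j")] := by decide
  unfold remove_numbers remove_numbers_alt
  rw [hpairs]
  simp only [List.foldl, PySem.Str.toList_lower, PySem.Str.toList_replace]
  simp only [show ("0" : String).toList = ['0'] from rfl, show ("1" : String).toList = ['1'] from rfl,
    show ("2" : String).toList = ['2'] from rfl, show ("3" : String).toList = ['3'] from rfl,
    show ("4" : String).toList = ['4'] from rfl, show ("5" : String).toList = ['5'] from rfl,
    show ("6" : String).toList = ['6'] from rfl, show ("7" : String).toList = ['7'] from rfl,
    show ("8" : String).toList = ['8'] from rfl, show ("9" : String).toList = ['9'] from rfl,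
    show ("a" : String).toList = ['a'] from rfl, show ("b" : String).toList = ['b'] from rfl,
    show ("c" : String).toList = ['c'] from rfl, show ("d" : String).toList = ['d'] from rfl,
    show ("e" : String).toList = ['e'] from rfl, show ("f" : String).toList = ['f'] from rfl,
    show ("g" : String).toList = ['g'] from rfl, show ("h" : String).toList = ['h'] from rfl,
    show ("i" : String).toList = ['i'] from rfl, show ("j" : String).toList = ['j'] from rfl,
    show ("<" : String).toList = ['<'] from rfl, show (">" : String).toList = ['>'] from rfl,
    show ("<=" : String).toList = ['<', '='] from rfl, show (">=" : String).toList = ['>', '='] from rfl,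
    show ("lt" : String).toList = ['l', 't'] from rfl, show ("gt" : String).toList = ['g', 't'] from rfl,
    show ("lte" : String).toList = ['l', 't', 'e'] from rfl, show ("gte" : String).toList = ['g', 't', 'e'] from rfl,
    show ("+" : String).toList = ['+'] from rfl, show ("plus" : String).toList = ['p', 'l', 'u', 's'] from rfl,
    show ("-" : String).toList = ['-'] from rfl, show ("minus" : String).toList = ['m', 'i', 'n', 'u', 's'] from rfl,
    show ("*" : String).toList = ['*'] from rfl, show ("times" : String).toList = ['t', 'i', 'm', 'e', 's'] from rfl,
    show ("/" : String).toList = ['/'] from rfl, show ("div" : String).toList = ['d', 'i', 'v'] from rfl]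
  rw [stage12 s.toList]
  rw [replace_skip '<' ['='] ['l', 't', 'e'] _
    (fun c hc => ((List.mem_flatMap.mp hc).elim (fun d hd => (chainA_no_angle d c hd.2).1))),
    replace_skip '>' ['='] ['g', 't', 'e'] _
    (fun c hc => ((List.mem_flatMap.mp hc).elim (fun d hd => (chainA_no_angle d c hd.2).2)))]
  simp only [replace_single, List.flatMap_assoc]
  rw [show (fun c => (fch '+' ['p', 'l', 'u', 's'] c).flatMap fun c => (fch '-' ['m', 'i', 'n', 'u', 's'] c).flatMap
      fun c => (fch '*' ['t', 'i', 'm', 'e', 's'] c).flatMap (fch '/' ['d', 'i', 'v'])) = chainC psB from by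
    funext c; simp [psB, chainC, List.flatMap_singleton']]
  rw [show (fun c => (chainC psA c).flatMap (chainC psB)) = chainC (psA ++ psB) from by
    funext c; rw [chainC_append]]
  simp only [PySem.Chars.lower, List.map_flatMap, String.toList_ofList]
  exact List.flatMap_congr (fun d _ => pointwise d)

-- ===== VERDICT (by name: the statement is the Claim_ definition above) =====
theorem remove_numbers_spec : Claim_equal_remove_numbers := by
  intro s _
  unfold Spec_remove_numbers
  exact remove_numbers_eq s
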